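-- pv_equiv track=rewrite | github.com/vincent-vega/adventofcode | 2023/day_01/1.py | _find
-- ===== SOURCE A (Python) =====
-- NUMBERS = [ 'one', 'two', 'three', 'four', 'five', 'six', 'seven', 'eight', 'nine' ]
--
-- def _find(line: str, last=False) -> int:
--     if last:
--         line = line[::-1]
--     for n, c in enumerate(line):
--         if c.isdigit():
--             return int(c)
--         for v, num in enumerate(NUMBERS, 1):
--             if last:
--                 num = num[::-1]
--             if len(line) - n >= len(num) and line[n:n + len(num)] == num:
--                 return v
-- ===== SOURCE B (Python) =====
-- NUMBERS = [ 'one', 'two', 'three', 'four', 'five', 'six', 'seven', 'eight', 'nine' ]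
--
-- TOKENS = [('0', 0), ('1', 1), ('2', 2), ('3', 3), ('4', 4), ('5', 5), ('6', 6),
--           ('7', 7), ('8', 8), ('9', 9),
--           ('one', 1), ('two', 2), ('three', 3), ('four', 4), ('five', 5),
--           ('six', 6), ('seven', 7), ('eight', 8), ('nine', 9)]
--
-- def _find(line: str, last=False) -> int:
--     # enumerate every token occurrence once, then pick the extremal one:
--     # earliest start for the first token, latest END for the last token
--     hits = []
--     for i in range(len(line)):
--         for t, v in TOKENS:
--             if line.startswith(t, i):
--                 hits.append((i + len(t) if last else i, v))
--     if not hits: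
--         return None
--     best = max(hits, key=lambda h: h[0]) if last else min(hits, key=lambda h: h[0])
--     return best[1]
-- ===== Notes on version B (the rewrite author's own statement) =====
-- stated objective: alternative
-- what changed: A reverses the line (and each word) for last=True and early-returns from a positional scan; B never reverses: it enumerates every token occurrence (digits and spelled numbers) once into a hit list keyed by start (first) or match end (last) and returns the value of the extremal hit via min/max.
-- outside the precondition, e.g. on _find('xyz', False): A returns None, B returns None
import Mathlib
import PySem

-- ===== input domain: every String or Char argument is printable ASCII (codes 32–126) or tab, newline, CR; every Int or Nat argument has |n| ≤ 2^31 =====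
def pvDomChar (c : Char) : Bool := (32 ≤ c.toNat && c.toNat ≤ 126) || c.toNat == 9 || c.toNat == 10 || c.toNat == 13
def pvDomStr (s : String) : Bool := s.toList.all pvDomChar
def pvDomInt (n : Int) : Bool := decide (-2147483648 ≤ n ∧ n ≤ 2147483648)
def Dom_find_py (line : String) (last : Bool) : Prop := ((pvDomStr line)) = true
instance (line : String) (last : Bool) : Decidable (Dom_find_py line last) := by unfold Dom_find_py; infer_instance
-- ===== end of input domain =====

-- B replaces A's reverse-the-line-and-words early-return scan by one full enumeration of
-- all token occurrences followed by a min/max extremum (alternative algorithm, same cost).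

-- ===== PORT A =====
def pvNumbersA : List String := ["one", "two", "three", "four", "five", "six", "seven", "eight", "nine"]

-- inner loop 'for v, num in enumerate(NUMBERS, 1)': num[::-1] = reverse, line[n:n+len(num)] = slice
def pvInnerA (l : List Char) (n : Int) (last : Bool) : List (Int × String) → Option Int
  | [] => none
  | (v, num0) :: rest =>
    let num := if last then num0.toList.reverse else num0.toList
    if (l.length : Int) - n ≥ (num.length : Int) ∧ PySem.List.slice l (some n) (some (n + num.length)) = num
    then some v
    else pvInnerA l n last rest

-- outer loop 'for n, c in enumerate(line)'; int(c) = c.toNat - 48, exact for the digits '0'..'9'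
def pvLoopA (l : List Char) (last : Bool) : List (Int × Char) → Option Int
  | [] => none
  | (n, c) :: rest =>
    if PySem.Chars.isdigit c then some ((c.toNat : Int) - 48)
    else
      match pvInnerA l n last (PySem.List.enumerate pvNumbersA 1) with
      | some v => some v
      | none => pvLoopA l last rest

-- 'if last: line = line[::-1]' = reverse; falling off the loop returns Python None (outside Pre_), ported as 0
def find_py (line : String) (last : Bool) : Int :=
  let l := if last then line.toList.reverse else line.toList
  (pvLoopA l last (PySem.List.enumerate l 0)).getD 0

-- ===== PORT B =====
def pvTokensB : List (String × Int) :=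
  [("0", 0), ("1", 1), ("2", 2), ("3", 3), ("4", 4), ("5", 5), ("6", 6), ("7", 7), ("8", 8), ("9", 9),
   ("one", 1), ("two", 2), ("three", 3), ("four", 4), ("five", 5),
   ("six", 6), ("seven", 7), ("eight", 8), ("nine", 9)]

-- 'line.startswith(t, i)' for 0 ≤ i ≤ len(line) is exactly startswith on line[i:]
def find_py_alt (line : String) (last : Bool) : Int :=
  let l := line.toList
  let hits : List (Int × Int) :=
    (PySem.List.pyRange 0 l.length 1).foldl (fun acc i =>
      pvTokensB.foldl (fun acc2 tv =>
        if PySem.Chars.startswith (l.drop i.toNat) tv.1.toList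
        then acc2 ++ [((if last then i + PySem.Str.len tv.1 else i), tv.2)]
        else acc2) acc) []
  if hits = [] then 0   -- Python B returns None here (outside Pre_), ported as 0
  else (if last then PySem.List.maxD hits (fun h => h.1) (0, 0)
        else PySem.List.minD hits (fun h => h.1) (0, 0)).2

-- ===== PRECONDITION & SPEC =====
-- Pre_ excludes exactly the lines containing no digit and no spelled-out number: there A's loop
-- falls through and Python returns None, which is not a value of the declared int return type.
def Pre_find_py (line : String) (last : Bool) : Prop :=
  (["0", "1", "2", "3", "4", "5", "6", "7", "8", "9",
    "one", "two", "three", "four", "five", "six", "seven", "eight", "nine"].any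
    (fun t => PySem.Str.isIn t line)) = true
instance (line : String) (last : Bool) : Decidable (Pre_find_py line last) := by
  unfold Pre_find_py; infer_instance

def pvWitness_find_py : String × Bool := ("ab3xtwo", true)

def Spec_find_py (line : String) (last : Bool) (out : Int) : Prop := out = find_py_alt line last
instance (line : String) (last : Bool) (out : Int) : Decidable (Spec_find_py line last out) := by
  unfold Spec_find_py; infer_instance

-- ===== CLAIM (what is proved, stated in full; the proofs are below) =====
def Claim_equal_find_py : Prop := ∀ (line : String) (last : Bool), Dom_find_py line last → Pre_find_py line last → Spec_find_py line last (find_py line last)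

-- ===== LEMMAS AND PROOFS =====

-- tokens as char lists (the value of pvTokensB after .toList): digits, then the words
def pvDigits : List (List Char × Int) :=
  [(['0'], 0), (['1'], 1), (['2'], 2), (['3'], 3), (['4'], 4), (['5'], 5), (['6'], 6), (['7'], 7), (['8'], 8), (['9'], 9)]

def pvWords : List (List Char × Int) :=
  [(['o','n','e'], 1), (['t','w','o'], 2), (['t','h','r','e','e'], 3), (['f','o','u','r'], 4), (['f','i','v','e'], 5),
   (['s','i','x'], 6), (['s','e','v','e','n'], 7), (['e','i','g','h','t'], 8), (['n','i','n','e'], 9)]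

def pvToks : List (List Char × Int) := pvDigits ++ pvWords

-- the words reversed (what A matches against after reversing the line)
def pvWordsR : List (List Char × Int) :=
  [(['e','n','o'], 1), (['o','w','t'], 2), (['e','e','r','h','t'], 3), (['r','u','o','f'], 4), (['e','v','i','f'], 5),
   (['x','i','s'], 6), (['n','e','v','e','s'], 7), (['t','h','g','i','e'], 8), (['e','n','i','n'], 9)]

def pvWordsDir (last : Bool) : List (List Char × Int) := if last then pvWordsR else pvWords

def pvToksDir (last : Bool) : List (List Char × Int) := pvDigits ++ pvWordsDir last

-- the per-position match-value list (A's inner check at one position of the scanned list L)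
def pvValsAt (L : List Char) (k : Nat) (last : Bool) : List Int :=
  (pvToksDir last).filterMap (fun tv => if tv.1 <+: L.drop k then some tv.2 else none)

-- all match values in A's scan order
def pvAllA (L : List Char) (last : Bool) : List Int :=
  (List.range L.length).flatMap (fun k => pvValsAt L k last)

-- B's hit list, in spec form
def pvHitsS (l : List Char) (last : Bool) : List (Int × Int) :=
  (List.range l.length).flatMap (fun i =>
    pvToks.filterMap (fun tv =>
      if tv.1 <+: l.drop i then some ((if last then (i : Int) + tv.1.length else (i : Int)), tv.2) else none))

-- a position-keyed hit list over an arbitrary token table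
def pvKeyed (L : List Char) (tk : List (List Char × Int)) : List (Int × Int) :=
  (List.range L.length).flatMap (fun i =>
    tk.filterMap (fun tv => if tv.1 <+: L.drop i then some ((i : Int), tv.2) else none))

theorem pvToks_eq : pvToks = pvTokensB.map (fun tv => (tv.1.toList, tv.2)) := by decide

theorem pvFilterMap_eq {α β : Type} (p : α → Bool) (f : α → β) (l : List α) :
    (l.filter p).map f = l.filterMap (fun x => if p x then some (f x) else none) := by
  induction l with
  | nil => rfl
  | cons x xs ih => by_cases h : p x <;> simp [h, ih]

theorem pvBlockEq (s : List Char) (i : Int) (last : Bool) (acc : List (Int × Int)) :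
    List.foldl (fun acc2 tv =>
        if PySem.Chars.startswith s tv.1.toList
        then acc2 ++ [((if last then i + PySem.Str.len tv.1 else i), tv.2)]
        else acc2) acc pvTokensB =
      acc ++ pvToks.filterMap (fun tv =>
        if tv.1 <+: s then some ((if last then i + tv.1.length else i), tv.2) else none) := by
  rw [PySem.List.foldl_append_if (fun tv => PySem.Chars.startswith s tv.1.toList)
        (fun tv => ((if last then i + PySem.Str.len tv.1 else i), tv.2)) pvTokensB acc]
  rw [pvFilterMap_eq, pvToks_eq, List.filterMap_map]
  congr 1
  apply List.filterMap_congr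
  intro tv _
  by_cases h : tv.1.toList <+: s
  · simp [Function.comp, PySem.Chars.startswith, List.isPrefixOf_iff_prefix, h, PySem.Str.len_eq]
  · simp [Function.comp, PySem.Chars.startswith, List.isPrefixOf_iff_prefix, h]

theorem pvHitsB_eq (line : String) (last : Bool) :
    find_py_alt line last =
      (if pvHitsS line.toList last = [] then 0
       else (if last then PySem.List.maxD (pvHitsS line.toList last) (fun h => h.1) (0, 0)
             else PySem.List.minD (pvHitsS line.toList last) (fun h => h.1) (0, 0)).2) := by
  have hh : (PySem.List.pyRange 0 (line.toList.length : Int) 1).foldl (fun acc i =>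
      pvTokensB.foldl (fun acc2 tv =>
        if PySem.Chars.startswith (line.toList.drop i.toNat) tv.1.toList
        then acc2 ++ [((if last then i + PySem.Str.len tv.1 else i), tv.2)]
        else acc2) acc) [] = pvHitsS line.toList last := by
    rw [PySem.List.pyRange_one, List.foldl_map]
    simp only [zero_add, Int.toNat_natCast, pvBlockEq]
    rw [PySem.List.foldl_append_eq_flatMap]
    simp [pvHitsS]
  simp only [find_py_alt, hh]

theorem pvWindow (l t : List Char) (i : Nat) (h : i + t.length ≤ l.length) :
    t <+: l.drop i ↔ t <:+ l.take (i + t.length) := by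
  constructor
  · intro hp
    have ht : t = (l.drop i).take t.length := List.prefix_iff_eq_take.mp hp
    have : l.take (i + t.length) = l.take i ++ t := by
      rw [List.take_add, ← ht]
    rw [this]
    exact List.suffix_append _ _
  · intro hs
    rcases hs with ⟨u, hu⟩
    have hlen : (l.take (i + t.length)).length = i + t.length := by
      simp [Nat.min_eq_left h]
    have hul : u.length = i := by
      have := congrArg List.length hu
      simp at this
      omega
    have hnil : u.drop i = [] := by
      apply List.drop_eq_nil_of_le
      omega
    have hdrop : (l.take (i + t.length)).drop i = t := by
      rw [← hu, List.drop_append, hnil, hul]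
      simp
    have : l.drop i = t ++ l.drop (i + t.length) := by
      conv_lhs => rw [← List.take_append_drop (i + t.length) l]
      rw [List.drop_append, hdrop, hlen, Nat.sub_eq_zero_of_le (by omega), List.drop_zero]
    rw [this]
    exact List.prefix_append _ _

theorem pvTok_suffix_eq : ∀ tv ∈ pvToks, ∀ tv' ∈ pvToks, tv.1 <:+ tv'.1 → tv = tv' := by
  decide

theorem pvTok_ne_nil : ∀ tv ∈ pvToks, tv.1 ≠ [] := by decide

theorem pvUniqueEnd (l : List Char) (e : Nat) {tv tv' : List Char × Int}
    (h1 : tv ∈ pvToks) (h2 : tv' ∈ pvToks)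
    (hs : tv.1 <:+ l.take e) (hs' : tv'.1 <:+ l.take e) : tv = tv' := by
  rcases List.suffix_or_suffix_of_suffix hs hs' with h | h
  · exact pvTok_suffix_eq tv h1 tv' h2 h
  · exact (pvTok_suffix_eq tv' h2 tv h1 h).symm

theorem pvCondA (L num : List Char) (k : Nat) (hk : k ≤ L.length) :
    (((L.length : Int) - (k : Int) ≥ (num.length : Int)) ∧
      PySem.List.slice L (some (k : Int)) (some ((k : Int) + (num.length : Int))) = num) ↔
      num <+: L.drop k := by
  rw [PySem.List.slice_natCast_add]
  constructor
  · rintro ⟨_, h2⟩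
    exact List.prefix_iff_eq_take.mpr h2.symm
  · intro hp
    have h2 := List.prefix_iff_eq_take.mp hp
    have hlen : num.length ≤ L.length - k := by
      have := hp.length_le
      simpa using this
    constructor
    · omega
    · exact h2.symm

theorem pvHeadStep (s t : List Char) (v : Int) (rest : List (List Char × Int)) :
    ((List.filterMap (fun (tv : List Char × Int) => if tv.1 <+: s then some tv.2 else none) ((t, v) :: rest)).head?) =
      (if t <+: s then some v else
        (List.filterMap (fun (tv : List Char × Int) => if tv.1 <+: s then some tv.2 else none) rest).head?) := by
  by_cases h : t <+: s <;> simp [h]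

set_option maxHeartbeats 2000000 in
theorem pvInnerA_eq (L : List Char) (k : Nat) (last : Bool) (hk : k ≤ L.length) :
    pvInnerA L (k : Int) last (PySem.List.enumerate pvNumbersA 1) =
      ((pvWordsDir last).filterMap
        (fun (tv : List Char × Int) => if tv.1 <+: L.drop k then some tv.2 else none)).head? := by
  have henum : PySem.List.enumerate pvNumbersA 1 =
      [((1:Int),"one"),(2,"two"),(3,"three"),(4,"four"),(5,"five"),(6,"six"),(7,"seven"),(8,"eight"),(9,"nine")] := by
    decide
  rw [henum]
  cases last with
  | false =>
    simp only [pvInnerA, pvWordsDir, if_false, Bool.false_eq_true]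
    simp only [show "one".toList = ['o','n','e'] from by decide,
      show "two".toList = ['t','w','o'] from by decide,
      show "three".toList = ['t','h','r','e','e'] from by decide,
      show "four".toList = ['f','o','u','r'] from by decide,
      show "five".toList = ['f','i','v','e'] from by decide,
      show "six".toList = ['s','i','x'] from by decide,
      show "seven".toList = ['s','e','v','e','n'] from by decide,
      show "eight".toList = ['e','i','g','h','t'] from by decide,
      show "nine".toList = ['n','i','n','e'] from by decide]
    simp only [pvWords, pvCondA _ _ _ hk, pvHeadStep, List.filterMap_nil, List.head?_nil]
  | true =>
    simp only [pvInnerA, pvWordsDir, if_true]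
    simp only [show "one".toList = ['o','n','e'] from by decide,
      show "two".toList = ['t','w','o'] from by decide,
      show "three".toList = ['t','h','r','e','e'] from by decide,
      show "four".toList = ['f','o','u','r'] from by decide,
      show "five".toList = ['f','i','v','e'] from by decide,
      show "six".toList = ['s','i','x'] from by decide,
      show "seven".toList = ['s','e','v','e','n'] from by decide,
      show "eight".toList = ['e','i','g','h','t'] from by decide,
      show "nine".toList = ['n','i','n','e'] from by decide]
    simp only [List.reverse_cons, List.reverse_nil, List.nil_append, List.cons_append]
    simp only [pvWordsR, pvCondA _ _ _ hk, pvHeadStep, List.filterMap_nil, List.head?_nil]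

theorem pvCharEq (c d : Char) (h : c.toNat = d.toNat) : c = d := by
  apply Char.ext
  exact UInt32.toNat_inj.mp h

theorem pvDigit_cases (c : Char) (h : PySem.Chars.isdigit c = true) :
    c = '0' ∨ c = '1' ∨ c = '2' ∨ c = '3' ∨ c = '4' ∨ c = '5' ∨ c = '6' ∨ c = '7' ∨ c = '8' ∨ c = '9' := by
  simp only [PySem.Chars.isdigit, Bool.and_eq_true, decide_eq_true_eq] at h
  have h0 : 48 ≤ c.toNat := h.1
  have h9 : c.toNat ≤ 57 := h.2
  have : c.toNat = 48 ∨ c.toNat = 49 ∨ c.toNat = 50 ∨ c.toNat = 51 ∨ c.toNat = 52 ∨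
      c.toNat = 53 ∨ c.toNat = 54 ∨ c.toNat = 55 ∨ c.toNat = 56 ∨ c.toNat = 57 := by omega
  rcases this with h | h | h | h | h | h | h | h | h | h <;>
    first
      | (have hc := pvCharEq c '0' (by rw [h]; rfl); tauto)
      | (have hc := pvCharEq c '1' (by rw [h]; rfl); tauto)
      | (have hc := pvCharEq c '2' (by rw [h]; rfl); tauto)
      | (have hc := pvCharEq c '3' (by rw [h]; rfl); tauto)
      | (have hc := pvCharEq c '4' (by rw [h]; rfl); tauto)
      | (have hc := pvCharEq c '5' (by rw [h]; rfl); tauto)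
      | (have hc := pvCharEq c '6' (by rw [h]; rfl); tauto)
      | (have hc := pvCharEq c '7' (by rw [h]; rfl); tauto)
      | (have hc := pvCharEq c '8' (by rw [h]; rfl); tauto)
      | (have hc := pvCharEq c '9' (by rw [h]; rfl); tauto)

theorem pvValsAt_split (L : List Char) (k : Nat) (last : Bool) :
    pvValsAt L k last =
      pvDigits.filterMap (fun tv => if tv.1 <+: L.drop k then some tv.2 else none) ++
      (pvWordsDir last).filterMap (fun tv => if tv.1 <+: L.drop k then some tv.2 else none) := by
  simp [pvValsAt, pvToksDir, List.filterMap_append]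

theorem pvDigitHead (L : List Char) (k : Nat) (c : Char) (cs : List Char)
    (hd : L.drop k = c :: cs) (hdig : PySem.Chars.isdigit c = true) (last : Bool) :
    (pvValsAt L k last).head? = some ((c.toNat : Int) - 48) := by
  rw [pvValsAt_split, List.head?_append]
  rcases pvDigit_cases c hdig with hc | hc | hc | hc | hc | hc | hc | hc | hc | hc <;>
    subst hc <;>
    simp [pvDigits, hd, List.cons_prefix_cons]

theorem pvNoDigitHead (L : List Char) (k : Nat) (c : Char) (cs : List Char)
    (hd : L.drop k = c :: cs) (hdig : PySem.Chars.isdigit c = false) (last : Bool) :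
    pvValsAt L k last =
      (pvWordsDir last).filterMap (fun tv => if tv.1 <+: L.drop k then some tv.2 else none) := by
  rw [pvValsAt_split]
  have hno : ∀ d : Char, PySem.Chars.isdigit d = true → ¬ (d = c) := by
    intro d hdd e
    rw [e] at hdd
    rw [hdd] at hdig
    cases hdig
  have e0 := hno '0' (by decide); have e1 := hno '1' (by decide)
  have e2 := hno '2' (by decide); have e3 := hno '3' (by decide)
  have e4 := hno '4' (by decide); have e5 := hno '5' (by decide)
  have e6 := hno '6' (by decide); have e7 := hno '7' (by decide)
  have e8 := hno '8' (by decide); have e9 := hno '9' (by decide)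
  simp [pvDigits, hd, List.cons_prefix_cons, e0, e1, e2, e3, e4, e5, e6, e7, e8, e9]

theorem pvLoopA_eq (L : List Char) (last : Bool) :
    ∀ (s : List Char) (k : Nat), L.drop k = s →
      pvLoopA L last (PySem.List.enumerate s (k : Int)) =
        ((List.range' k (L.length - k)).flatMap (fun j => pvValsAt L j last)).head? := by
  intro s
  induction s with
  | nil =>
    intro k hk
    have hle : L.length ≤ k := by
      by_contra hcon
      have := List.drop_eq_nil_iff.mp hk
      omega
    rw [show L.length - k = 0 from by omega]
    simp [PySem.List.enumerate, pvLoopA]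
  | cons c cs ih =>
    intro k hd
    have hlen : L.length - k = cs.length + 1 := by
      have := congrArg List.length hd
      simp at this
      omega
    have hk' : k < L.length := by omega
    have hcs : L.drop (k + 1) = cs := by
      rw [← List.tail_drop, hd]
      rfl
    rw [PySem.List.enumerate_cons, hlen, List.range'_succ, List.flatMap_cons, List.head?_append]
    simp only [pvLoopA]
    by_cases hdig : PySem.Chars.isdigit c
    · rw [if_pos hdig, pvDigitHead L k c cs hd hdig last, Option.some_or]
    · rw [if_neg hdig]
      rw [pvInnerA_eq L k last (le_of_lt hk')]
      rw [← pvNoDigitHead L k c cs hd (by simpa using hdig) last]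
      have hih := ih (k + 1) hcs
      rw [show ((k : Int) + 1) = (((k + 1 : Nat)) : Int) from by push_cast; ring]
      rw [hih, show L.length - (k + 1) = cs.length from by omega]
      cases hv : (pvValsAt L k last).head? <;> simp [hv]

theorem pvFindA_eq (line : String) (last : Bool) :
    find_py line last =
      ((pvAllA (if last then line.toList.reverse else line.toList) last).head?).getD 0 := by
  simp only [find_py]
  have h0 := pvLoopA_eq (if last then line.toList.reverse else line.toList) last
      (if last then line.toList.reverse else line.toList) 0 (by simp)
  rw [show (0 : Int) = ((0 : Nat) : Int) from rfl, h0]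
  simp [pvAllA, List.range_eq_range']

theorem pvFindA_false (line : String) :
    find_py line false = ((pvAllA line.toList false).head?).getD 0 := by
  simpa using pvFindA_eq line false

theorem pvFindA_true (line : String) :
    find_py line true = ((pvAllA line.toList.reverse true).head?).getD 0 := by
  simpa using pvFindA_eq line true

theorem pvAlign (L : List Char) (tk : List (List Char × Int)) :
    (List.range L.length).flatMap (fun k =>
        tk.filterMap (fun tv => if tv.1 <+: L.drop k then some tv.2 else none)) =
      (pvKeyed L tk).map (fun h => h.2) := by
  simp only [pvKeyed, List.map_flatMap]
  congr 1
  funext i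
  rw [List.map_filterMap]
  apply List.filterMap_congr
  intro tv _
  by_cases h : tv.1 <+: L.drop i <;> simp [h]

theorem pvKeyedKey (L : List Char) (tk : List (List Char × Int)) (i : Nat)
    (x : Int × Int)
    (hx : x ∈ tk.filterMap (fun tv => if tv.1 <+: L.drop i then some ((i : Int), tv.2) else none)) :
    x.1 = (i : Int) := by
  rcases List.mem_filterMap.mp hx with ⟨tv, _, htv⟩
  by_cases h : tv.1 <+: L.drop i
  · rw [if_pos h] at htv
    cases htv
    rfl
  · rw [if_neg h] at htv
    cases htv

theorem pvKeyedMono (L : List Char) (tk : List (List Char × Int)) :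
    (pvKeyed L tk).Pairwise (fun a b => a.1 ≤ b.1) := by
  unfold pvKeyed
  rw [List.pairwise_flatMap]
  constructor
  · intro i _
    apply List.pairwise_of_forall_mem_list
    intro a ha b hb
    rw [pvKeyedKey L tk i a ha, pvKeyedKey L tk i b hb]
  · apply List.Pairwise.imp ?_ (List.pairwise_lt_range)
    intro i j hij x hx y hy
    rw [pvKeyedKey L tk i x hx, pvKeyedKey L tk j y hy]
    exact_mod_cast le_of_lt hij

theorem pvKeyedMem (L : List Char) (tk : List (List Char × Int)) (x : Int × Int) :
    x ∈ pvKeyed L tk ↔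
      ∃ (i : Nat), i < L.length ∧ ∃ tv ∈ tk, tv.1 <+: L.drop i ∧ x = ((i : Int), tv.2) := by
  simp only [pvKeyed, List.mem_flatMap, List.mem_range, List.mem_filterMap,
    Option.ite_none_right_eq_some, Option.some.injEq]
  constructor
  · rintro ⟨i, hi, tv, htv, hc, he⟩
    exact ⟨i, hi, tv, htv, hc, he.symm⟩
  · rintro ⟨i, hi, tv, htv, hc, he⟩
    exact ⟨i, hi, tv, htv, hc, he.symm⟩

theorem pvKeyedNonempty (L : List Char) (tk : List (List Char × Int))
    (h : ∃ tv ∈ tk, tv.1 ≠ [] ∧ PySem.Chars.isIn tv.1 L = true) : pvKeyed L tk ≠ [] := by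
  rcases h with ⟨tv, htv, hne, hin⟩
  rcases (PySem.Chars.exists_prefix_drop_iff_isIn tv.1 L).mpr hin with ⟨j, hj⟩
  have hjlt : j < L.length := by
    by_contra hcon
    rw [List.drop_eq_nil_of_le (by omega)] at hj
    exact hne (List.prefix_nil.mp hj)
  exact List.ne_nil_of_mem ((pvKeyedMem L tk _).mpr ⟨j, hjlt, tv, htv, hj, rfl⟩)

theorem pvHitsS_false (l : List Char) : pvHitsS l false = pvKeyed l pvToks := by
  simp [pvHitsS, pvKeyed]

theorem pvMemHitsLast (l : List Char) (x : Int × Int) :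
    x ∈ pvHitsS l true ↔
      ∃ tv ∈ pvToks, x.2 = tv.2 ∧ (tv.1.length : Int) ≤ x.1 ∧ x.1 ≤ (l.length : Int) ∧
        tv.1 <:+ l.take x.1.toNat := by
  obtain ⟨x1, x2⟩ := x
  simp only [pvHitsS, if_true, List.mem_flatMap, List.mem_range, List.mem_filterMap,
    Option.ite_none_right_eq_some, Option.some.injEq]
  constructor
  · rintro ⟨i, hi, tv, htv, hc, he⟩
    injection he with he1 he2
    subst he1
    subst he2
    have hlenle : i + tv.1.length ≤ l.length := by
      have h1 := hc.length_le
      simp at h1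
      omega
    refine ⟨tv, htv, rfl, by push_cast; omega, by push_cast; omega, ?_⟩
    have h2 : ((i : Int) + (tv.1.length : Int)).toNat = i + tv.1.length := by omega
    simp only [h2]
    exact (pvWindow l tv.1 i hlenle).mp hc
  · rintro ⟨tv, htv, hv, hlo, hhi, hsuf⟩
    have htne := pvTok_ne_nil tv htv
    have htpos : 1 ≤ tv.1.length := List.length_pos_of_ne_nil htne
    have hel : x1.toNat ≤ l.length := by omega
    have het : tv.1.length ≤ x1.toNat := by omega
    refine ⟨x1.toNat - tv.1.length, by omega, tv, htv, ?_, ?_⟩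
    · apply (pvWindow l tv.1 (x1.toNat - tv.1.length) (by omega)).mpr
      rw [show x1.toNat - tv.1.length + tv.1.length = x1.toNat from by omega]
      exact hsuf
    · have h5 : ((x1.toNat - tv.1.length : Nat) : Int) + (tv.1.length : Int) = x1 := by omega
      rw [h5, hv]

def pvToksR : List (List Char × Int) := pvDigits ++ pvWordsR

theorem pvToksR_eq : pvToksR = pvToks.map (fun tv => (tv.1.reverse, tv.2)) := by decide

theorem pvMemAllLastR (l : List Char) (j : Nat) (tv : List Char × Int)
    (hj : j < l.length) (htv : tv ∈ pvToks) :
    (tv.1.reverse <+: (l.reverse.drop j) ↔ tv.1 <:+ l.take (l.length - j)) := by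
  rw [List.drop_reverse, List.reverse_prefix]

theorem pvPre_list (t : String)
    (ht : t ∈ ["0", "1", "2", "3", "4", "5", "6", "7", "8", "9",
      "one", "two", "three", "four", "five", "six", "seven", "eight", "nine"]) :
    (∃ tv ∈ pvToks, tv.1 = t.toList ∧ tv.1 ≠ []) ∧
      (∃ tv ∈ pvToksR, tv.1 = t.toList.reverse ∧ tv.1 ≠ []) := by
  fin_cases ht <;> decide

theorem pvMin?_keep {α : Type} (key : α → Int) :
    ∀ (xs : List α) (m : α), (∀ y ∈ xs, key m ≤ key y) →
      PySem.List.min? (m :: xs) key = some m := by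
  intro xs
  induction xs with
  | nil => intro m _; rfl
  | cons y ys ih =>
    intro m h
    have hy : ¬ key y < key m := not_lt.mpr (h y (by simp))
    have hih := ih m (fun z hz => h z (by simp [hz]))
    simp only [PySem.List.min?, List.foldl_cons] at hih ⊢
    simpa [hy] using hih

theorem pvMin_head {α : Type} (key : α → Int) (x : α) (xs : List α) (d : α)
    (h : ∀ y ∈ xs, key x ≤ key y) : PySem.List.minD (x :: xs) key d = x := by
  simp only [PySem.List.minD, pvMin?_keep key xs x h, Option.getD_some]

theorem pvMax_unique {α : Type} (key : α → Int) (m : α) (xs : List α) (d : α)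
    (hm : m ∈ xs) (h : ∀ y ∈ xs, y ≠ m → key y < key m) : PySem.List.maxD xs key d = m := by
  have hne : xs ≠ [] := by rintro rfl; simp at hm
  have h1 := PySem.List.max?_eq_some_maxD xs key d hne
  have h2 := PySem.List.maxD_mem xs key d hne
  have h3 := PySem.List.max?_isMax h1 m hm
  by_cases he : PySem.List.maxD xs key d = m
  · exact he
  · have := h _ h2 he
    omega

theorem pvPre_toks (line : String) (last : Bool) (h : Pre_find_py line last) :
    (∃ tv ∈ pvToks, tv.1 ≠ [] ∧ PySem.Chars.isIn tv.1 line.toList = true) ∧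
      (∃ tv ∈ pvToksR, tv.1 ≠ [] ∧ PySem.Chars.isIn tv.1 line.toList.reverse = true) := by
  rcases List.any_eq_true.mp h with ⟨t, htmem, hin⟩
  rw [PySem.Str.isIn_eq] at hin
  rcases pvPre_list t htmem with ⟨⟨tv, htv, htv1, htvne⟩, ⟨tw, htw, htw1, htwne⟩⟩
  constructor
  · exact ⟨tv, htv, htvne, by rw [htv1]; exact hin⟩
  · refine ⟨tw, htw, htwne, ?_⟩
    rw [htw1, PySem.Chars.isIn_iff_infix, List.reverse_infix]
    exact (PySem.Chars.isIn_iff_infix _ _).mp hin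

theorem pvEquiv_first (line : String) (h : Pre_find_py line false) :
    find_py line false = find_py_alt line false := by
  have hA := pvFindA_false line
  have halign : pvAllA line.toList false = (pvKeyed line.toList pvToks).map (fun h => h.2) :=
    pvAlign line.toList pvToks
  have hne : pvKeyed line.toList pvToks ≠ [] :=
    pvKeyedNonempty _ _ (pvPre_toks line false h).1
  rcases hk : pvKeyed line.toList pvToks with _ | ⟨h0, rest⟩
  · exact absurd hk hne
  have hB := pvHitsB_eq line false
  rw [pvHitsS_false, hk] at hB
  rw [if_neg (List.cons_ne_nil h0 rest)] at hB
  have hmono := pvKeyedMono line.toList pvToks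
  rw [hk] at hmono
  have hmin : PySem.List.minD (h0 :: rest) (fun h => h.1) (0, 0) = h0 :=
    pvMin_head _ h0 rest _ (fun y hy => List.rel_of_pairwise_cons hmono hy)
  rw [hA, halign, hk]
  rw [hB]
  simp [hmin]

theorem pvEquiv_last (line : String) (h : Pre_find_py line true) :
    find_py line true = find_py_alt line true := by
  set l := line.toList with hl
  have hA := pvFindA_true line
  have halign : pvAllA l.reverse true = (pvKeyed l.reverse pvToksR).map (fun h => h.2) :=
    pvAlign l.reverse pvToksR
  have hneR : pvKeyed l.reverse pvToksR ≠ [] :=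
    pvKeyedNonempty _ _ (pvPre_toks line true h).2
  rcases hk : pvKeyed l.reverse pvToksR with _ | ⟨r, rest⟩
  · exact absurd hk hneR
  -- decode the first reversed-scan hit r
  have hrmem : r ∈ pvKeyed l.reverse pvToksR := by rw [hk]; exact List.mem_cons_self
  rcases (pvKeyedMem _ _ _).mp hrmem with ⟨j, hjlt, tw, htw, hpre, hr⟩
  rcases List.mem_map.mp (by rw [← pvToksR_eq]; exact htw) with ⟨tv, htv, htweq⟩
  have hjlt' : j < l.length := by simpa using hjlt
  have hsuf : tv.1 <:+ l.take (l.length - j) := by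
    have := (pvMemAllLastR l j tv hjlt' htv).mp
    apply this
    rw [← show tw.1 = tv.1.reverse from by rw [← htweq]]
    exact hpre
  have htne := pvTok_ne_nil tv htv
  have htpos : 1 ≤ tv.1.length := List.length_pos_of_ne_nil htne
  have hlej : tv.1.length ≤ l.length - j := by
    have h1 := hsuf.length_le
    simp at h1
    omega
  -- the corresponding end-keyed hit
  set e0 : Nat := l.length - j with he0
  have hm : (((e0 : Nat) : Int), tv.2) ∈ pvHitsS l true := by
    apply (pvMemHitsLast l _).mpr
    refine ⟨tv, htv, rfl, by push_cast; omega, by push_cast; omega, ?_⟩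
    simpa using hsuf
  have hitsne : pvHitsS l true ≠ [] := List.ne_nil_of_mem hm
  -- every other hit ends strictly earlier
  have hmax : ∀ y ∈ pvHitsS l true, y ≠ (((e0 : Nat) : Int), tv.2) → y.1 < ((e0 : Nat) : Int) := by
    intro y hy hne
    rcases (pvMemHitsLast l y).mp hy with ⟨tv', htv', hv', hlo', hhi', hsuf'⟩
    have htne' := pvTok_ne_nil tv' htv'
    have htpos' : 1 ≤ tv'.1.length := List.length_pos_of_ne_nil htne'
    have hy1 : 1 ≤ y.1 := by push_cast at hlo'; omega
    have hytop : y.1.toNat ≤ l.length := by omega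
    set j' : Nat := l.length - y.1.toNat with hj'
    have hj'lt : j' < l.length := by omega
    have hyR : ((j' : Int), tv'.2) ∈ pvKeyed l.reverse pvToksR := by
      apply (pvKeyedMem _ _ _).mpr
      refine ⟨j', by simpa using hj'lt, (tv'.1.reverse, tv'.2), ?_, ?_, rfl⟩
      · rw [pvToksR_eq]
        exact List.mem_map.mpr ⟨tv', htv', rfl⟩
      · show tv'.1.reverse <+: l.reverse.drop j'
        apply (pvMemAllLastR l j' tv' hj'lt htv').mpr
        rw [show l.length - j' = y.1.toNat from by omega]
        exact hsuf'
    have hjj' : j ≤ j' := by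
      rcases List.mem_cons.mp (by rw [← hk]; exact hyR) with heq | hmem
      · have : ((j : Int), tw.2) = ((j' : Int), tv'.2) := by rw [← hr]; exact heq.symm
        have := congrArg Prod.fst this
        simp at this
        omega
      · have hmono := pvKeyedMono l.reverse pvToksR
        rw [hk] at hmono
        have := List.rel_of_pairwise_cons hmono hmem
        rw [hr] at this
        simp at this
        omega
    by_contra hcon
    have hye : y.1 = ((e0 : Nat) : Int) := by omega
    have heqtok : tv' = tv := by
      apply pvUniqueEnd l e0 htv' htv
      · rw [← show y.1.toNat = e0 from by omega]
        exact hsuf'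
      · exact hsuf
    apply hne
    have : y = (y.1, y.2) := rfl
    rw [this, hye, hv', heqtok]
  have hB := pvHitsB_eq line true
  rw [if_neg hitsne] at hB
  rw [if_pos rfl] at hB
  have hmaxD : PySem.List.maxD (pvHitsS l true) (fun h => h.1) (0, 0) = (((e0 : Nat) : Int), tv.2) :=
    pvMax_unique _ _ _ _ hm hmax
  rw [hA, halign, hk]
  rw [hB, hmaxD]
  simp [hr, ← htweq]

-- ===== VERDICT (by name: the statement is the Claim_ definition above) =====
theorem find_py_spec : Claim_equal_find_py := by
  intro line last _ hpre
  unfold Spec_find_py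
  cases last with
  | false => exact pvEquiv_first line hpre
  | true => exact pvEquiv_last line hpre
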